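-- pv_equiv track=rewrite | github.com/miliar/Code_Jam_Webscraper | solutions_python/Problem_60/62.py | solve
-- ===== SOURCE A (Python) =====
-- def solve(Parms,X,V):
--     #step 1: work out Hindered positions/other
--     [N,K,B,T] = Parms;
--     UH = [X[i]+V[i]*T >= B for i in range(N)];
--     sm = sum(UH);
--     if(sm<K):
--         return 'IMPOSSIBLE';
--
--     tot = 0;
--     for start in range(N):
--         tot += UH[start];
--         if(tot>(sm-K)):
--             break
--
--     ret = 0;
--     tot = 0;
--     for j in range(start,N):
--         if(UH[j]):
--             tot+=1;
--         else:
--             ret+=tot;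
--     return str(ret);
-- ===== SOURCE B (Python) =====
-- def solve(Parms, X, V):
--     [N, K, B, T] = Parms
--     # indices of hindered items, in order
--     P = [i for i in range(N) if X[i] + V[i] * T >= B]
--     if len(P) < K:
--         return 'IMPOSSIBLE'
--     # keep the last K hindered indices; each kept index p at rank r among the
--     # kept still has (K-1-r) hindered items after it, so the number of
--     # unhindered items after p is (N-1-p) - (K-1-r); summing these closed-form
--     # terms gives the swap count directly, with no scan over unhindered items.
--     kept = P[len(P) - K:]
--     return str(sum((N - 1 - p) - (K - 1 - r) for r, p in enumerate(kept)))
-- ===== Notes on version B (the rewrite author's own statement) =====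
-- stated objective: alternative
-- what changed: A scans the boolean array twice (a break loop to find a cutoff index, then a suffix loop accumulating a running hindered counter over unhindered items); B instead builds the list of hindered INDICES, keeps the last K of them, and returns a closed-form arithmetic sum (N-1-p)-(K-1-r) over those K positions, never scanning unhindered items.
import Mathlib
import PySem

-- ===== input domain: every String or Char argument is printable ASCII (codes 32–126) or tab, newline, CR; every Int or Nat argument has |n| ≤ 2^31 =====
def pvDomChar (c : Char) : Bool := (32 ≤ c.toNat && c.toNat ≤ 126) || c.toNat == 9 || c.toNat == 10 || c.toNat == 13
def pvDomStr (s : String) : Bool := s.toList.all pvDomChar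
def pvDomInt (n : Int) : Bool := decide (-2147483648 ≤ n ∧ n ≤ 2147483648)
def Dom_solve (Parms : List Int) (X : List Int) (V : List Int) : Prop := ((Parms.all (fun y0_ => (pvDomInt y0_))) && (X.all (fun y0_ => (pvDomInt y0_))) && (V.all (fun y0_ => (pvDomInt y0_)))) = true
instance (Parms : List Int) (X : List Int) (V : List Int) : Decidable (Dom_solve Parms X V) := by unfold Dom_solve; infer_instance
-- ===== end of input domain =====

-- B replaces A's two scans over the hindered booleans (a break-loop cutoff search
-- plus a suffix accumulation over unhindered items) by a list of the hindered
-- indices of which the last K are kept, and a closed-form arithmetic sum over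
-- those K positions; same O(n) cost, a different algorithm.

-- ===== PORT A =====
-- A's first loop: 'for start in range(N): tot += UH[start]; if tot > s: break'.
-- Returns the break index; if the loop runs out, 'start' keeps its last value i-1
-- (on an empty range Python raises UnboundLocalError: excluded by Pre_solve; the
-- returned -1 there is junk).
def findStartA : List Bool → Int → Int → Int → Int
  | [], i, _, _ => i - 1
  | true :: rest, i, tot, s =>
    if s < tot + 1 then i else findStartA rest (i + 1) (tot + 1) s
  | false :: rest, i, tot, s =>
    if s < tot then i else findStartA rest (i + 1) tot s

-- A's second loop: 'for j in range(start, N): if UH[j]: tot += 1 else: ret += tot'.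
def accumA : List Bool → Int → Int → Int
  | [], _, ret => ret
  | b :: rest, tot, ret =>
    if b then accumA rest (tot + 1) ret else accumA rest tot (ret + tot)

def solve (Parms : List Int) (X : List Int) (V : List Int) : String :=
  match Parms with
  | [N, K, B, T] =>
    let UH := (PySem.List.pyRange 0 N 1).map
      (fun i => decide (B ≤ PySem.List.pyGetD X i 0 + PySem.List.pyGetD V i 0 * T))
    let sm := UH.foldl (fun a b => a + (if b then (1 : Int) else 0)) 0
    if sm < K then "IMPOSSIBLE"
    else
      -- range(start, N) over UH = UH[start:]; start ≥ 0 whenever Python reaches here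
      PySem.Int.toStr (accumA (UH.drop (findStartA UH 0 0 (sm - K)).toNat) 0 0)
  | _ => ""  -- Python raises ValueError on unpacking; outside Pre_solve

-- ===== PORT B =====
-- B's sum over the kept hindered indices: 'sum((N-1-p) - (K-1-r) for r, p in enumerate(kept))'.
def sumKept : List Int → Int → Int → Int → Int → Int
  | [], _, _, _, acc => acc
  | p :: rest, r, N, K, acc => sumKept rest (r + 1) N K (acc + ((N - 1 - p) - (K - 1 - r)))

def solve_alt (Parms : List Int) (X : List Int) (V : List Int) : String :=
  -- '[N, K, B, T] = Parms' ported as a length guard with positional reads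
  -- (exact: Python raises ValueError on any other length, outside Pre_solve)
  if Parms.length = 4 then
    let N := Parms.getD 0 0
    let K := Parms.getD 1 0
    let B := Parms.getD 2 0
    let T := Parms.getD 3 0
    let P := (PySem.List.pyRange 0 N 1).filter
      (fun i => decide (B ≤ PySem.List.pyGetD X i 0 + PySem.List.pyGetD V i 0 * T))
    if (P.length : Int) < K then "IMPOSSIBLE"
    else
      -- P[len(P)-K:] — the index len(P)-K is ≥ 0 whenever this branch is reached
      let kept := P.drop ((P.length : Int) - K).toNat
      PySem.Int.toStr (sumKept kept 0 N K 0)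
  else ""

-- ===== PRECONDITION & SPEC =====
-- Pre_solve excludes exactly the inputs where Python A raises: Parms not of length 4
-- (ValueError on unpacking), an index 0 ≤ i < N beyond X or V (IndexError), and
-- N ≤ 0 with K ≤ 0, where the first loop body never runs and 'start' is unbound
-- (UnboundLocalError).
def Pre_solve (Parms : List Int) (X : List Int) (V : List Int) : Prop :=
  Parms.length = 4 ∧
  (Parms.getD 0 0 ≤ 0 ∨ (Parms.getD 0 0 ≤ (X.length : Int) ∧ Parms.getD 0 0 ≤ (V.length : Int))) ∧
  (1 ≤ Parms.getD 0 0 ∨ 1 ≤ Parms.getD 1 0)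
instance (Parms : List Int) (X : List Int) (V : List Int) : Decidable (Pre_solve Parms X V) := by
  unfold Pre_solve; infer_instance

def pvWitness_solve : List Int × List Int × List Int :=
  ([4, 1, 2, 1], [1, 0, 3, 0], [1, 1, 0, 0])

def Spec_solve (Parms : List Int) (X : List Int) (V : List Int) (out : String) : Prop :=
  out = solve_alt Parms X V
instance (Parms : List Int) (X : List Int) (V : List Int) (out : String) :
    Decidable (Spec_solve Parms X V out) := by unfold Spec_solve; infer_instance

-- ===== CLAIM (what is proved, stated in full; the proofs are below) =====
def Claim_equal_solve : Prop := ∀ (Parms : List Int) (X : List Int) (V : List Int),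
  Dom_solve Parms X V → Pre_solve Parms X V → Spec_solve Parms X V (solve Parms X V)

-- ===== LEMMAS AND PROOFS =====

-- proof-side bridge: one fused pass carrying (skip, seen, swaps)
def onePassB : List Bool → Int → Int → Int → Int
  | [], _, _, swaps => swaps
  | h :: rest, skip, seen, swaps =>
    if h then
      if 0 < skip then onePassB rest (skip - 1) seen swaps
      else onePassB rest skip (seen + 1) swaps
    else onePassB rest skip seen (swaps + seen)

def cntT : List Bool → Int
  | [] => 0
  | b :: rest => (if b then 1 else 0) + cntT rest

def cntF : List Bool → Int
  | [] => 0
  | b :: rest => (if b then 0 else 1) + cntF rest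

-- proof-side bridge: swap count as a sum of suffix false-counts over the kept trues
def keptSum : List Bool → Int → Int
  | [], _ => 0
  | true :: rest, s => if 0 < s then keptSum rest (s - 1) else cntF rest + keptSum rest s
  | false :: rest, s => keptSum rest s

-- positions of the 'true's of a boolean list, offset i
def tpos : List Bool → Int → List Int
  | [], _ => []
  | true :: rest, i => i :: tpos rest (i + 1)
  | false :: rest, i => tpos rest (i + 1)

theorem findStartA_shift_i (L : List Bool) : ∀ (i t s : Int),
    findStartA L i t s = i + findStartA L 0 t s := by
  induction L with
  | nil => intro i t s; simp only [findStartA]; ring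
  | cons b rest ih =>
    intro i t s
    rcases b with _ | _ <;> simp only [findStartA] <;> split_ifs
    · ring
    · rw [ih (i + 1), ih (0 + 1)]; ring
    · ring
    · rw [ih (i + 1), ih (0 + 1)]; ring

theorem findStartA_shift_tot (L : List Bool) : ∀ (i t s : Int),
    findStartA L i t s = findStartA L i 0 (s - t) := by
  induction L with
  | nil => intro i t s; rfl
  | cons b rest ih =>
    intro i t s
    rcases b with _ | _ <;> simp only [findStartA]
    · by_cases h : s < t
      · rw [if_pos h, if_pos (by omega)]
      · rw [if_neg h, if_neg (by omega), ih (i + 1) t s]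
    · by_cases h : s < t + 1
      · rw [if_pos h, if_pos (by omega)]
      · rw [if_neg h, if_neg (by omega), ih (i + 1) (t + 1) s, ih (i + 1) (0 + 1) (s - t)]
        have he : s - (t + 1) = s - t - (0 + 1) := by ring
        rw [he]

theorem findStartA_nonneg (L : List Bool) (hL : L ≠ []) (i t s : Int) :
    i ≤ findStartA L i t s := by
  induction L generalizing i t s with
  | nil => exact absurd rfl hL
  | cons b rest ih =>
    rcases rest with _ | ⟨c, rs⟩
    · rcases b with _ | _ <;> simp only [findStartA] <;> split_ifs <;> omega
    · rcases b with _ | _ <;> simp only [findStartA] <;> split_ifs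
      · omega
      · have := ih (by simp) (i + 1) t s; omega
      · omega
      · have := ih (by simp) (i + 1) (t + 1) s; omega

theorem accumA_eq_onePassB (L : List Bool) : ∀ (t r : Int),
    accumA L t r = onePassB L 0 t r := by
  induction L with
  | nil => intro t r; rfl
  | cons b rest ih =>
    intro t r
    rcases b with _ | _ <;> simp [accumA, onePassB, ih]

theorem main_lemma (L : List Bool) : ∀ (s : Int), 0 ≤ s →
    accumA (L.drop (findStartA L 0 0 s).toNat) 0 0 = onePassB L s 0 0 := by
  induction L with
  | nil => intro s _; rfl
  | cons b rest ih =>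
    intro s hs
    rcases b with _ | _
    · -- head is false
      have h1 : findStartA (false :: rest) 0 0 s = 1 + findStartA rest 0 0 s := by
        simp only [findStartA]
        rw [if_neg (by omega)]
        simpa using findStartA_shift_i rest 1 0 s
      rcases rest with _ | ⟨c, rs⟩
      · simp [findStartA, accumA, onePassB]
      · have hnn : 0 ≤ findStartA (c :: rs) 0 0 s := findStartA_nonneg _ (by simp) 0 0 s
        have h2 : (findStartA (false :: c :: rs) 0 0 s).toNat
            = (findStartA (c :: rs) 0 0 s).toNat + 1 := by rw [h1]; omega
        rw [h2]
        simp only [List.drop_succ_cons]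
        rw [ih s hs]
        simp [onePassB]
    · -- head is true
      by_cases h0 : s < 1
      · have hs0 : s = 0 := by omega
        subst hs0
        have h1 : findStartA (true :: rest) 0 0 0 = 0 := by
          simp [findStartA]
        rw [h1]
        simp only [Int.toNat_zero, List.drop_zero]
        simp [accumA, onePassB, accumA_eq_onePassB]
      · have h1 : findStartA (true :: rest) 0 0 s = 1 + findStartA rest 0 0 (s - 1) := by
          simp only [findStartA]
          rw [if_neg (by omega), findStartA_shift_i rest (0 + 1) (0 + 1) s,
            findStartA_shift_tot rest 0 (0 + 1) s]
          norm_num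
        rcases rest with _ | ⟨c, rs⟩
        · have : findStartA [true] 0 0 s = 0 := by rw [h1]; rfl
          rw [this]
          simp only [Int.toNat_zero, List.drop_zero]
          simp [accumA, onePassB]
        · have hnn : 0 ≤ findStartA (c :: rs) 0 0 (s - 1) := findStartA_nonneg _ (by simp) 0 0 _
          have h2 : (findStartA (true :: c :: rs) 0 0 s).toNat
              = (findStartA (c :: rs) 0 0 (s - 1)).toNat + 1 := by rw [h1]; omega
          rw [h2]
          simp only [List.drop_succ_cons]
          rw [ih (s - 1) (by omega)]
          simp only [onePassB, if_pos (show (0:Int) < s by omega), if_true]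

theorem onePassB_eq_keptSum (L : List Bool) : ∀ (s seen swaps : Int),
    onePassB L s seen swaps = swaps + seen * cntF L + keptSum L s := by
  induction L with
  | nil => intro s seen swaps; simp [onePassB, cntF, keptSum]
  | cons b rest ih =>
    intro s seen swaps
    rcases b with _ | _
    · simp only [onePassB, cntF, keptSum, ih, Bool.false_eq_true, if_false, reduceIte]; ring
    · by_cases h : 0 < s
      · simp only [onePassB, cntF, keptSum, if_pos h, reduceIte, ih]; ring
      · simp only [onePassB, cntF, keptSum, if_neg h, reduceIte, ih]; ring

theorem cntF_eq (L : List Bool) : cntF L = (L.length : Int) - cntT L := by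
  induction L with
  | nil => simp [cntF, cntT]
  | cons b rest ih =>
    rcases b with _ | _ <;> simp [cntF, cntT, ih] <;> push_cast <;> ring

theorem sumKept_acc (L : List Int) : ∀ (r N K acc : Int),
    sumKept L r N K acc = acc + sumKept L r N K 0 := by
  induction L with
  | nil => intro r N K acc; simp [sumKept]
  | cons p rest ih =>
    intro r N K acc
    simp only [sumKept]
    rw [ih (r + 1) N K, ih (r + 1) N K (0 + _)]
    ring

theorem sumKept_tpos (L : List Bool) : ∀ (i r s : Int), 0 ≤ s →
    sumKept ((tpos L i).drop s.toNat) r (i + (L.length : Int)) (r + cntT L - s) 0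
      = keptSum L s := by
  induction L with
  | nil => intro i r s _; simp [tpos, sumKept, keptSum]
  | cons b rest ih =>
    intro i r s hs
    rcases b with _ | _
    · -- false head
      simp only [tpos, keptSum, cntT, List.length_cons]
      have h1 : i + ((rest.length + 1 : Nat) : Int) = (i + 1) + (rest.length : Int) := by
        push_cast; ring
      have h2 : r + ((if False then (1:Int) else 0) + cntT rest) - s = r + cntT rest - s := by
        simp
      rw [h1]
      have := ih (i + 1) r s hs
      simpa using this
    · -- true head
      by_cases h : 0 < s
      · simp only [tpos, keptSum, cntT, List.length_cons, if_pos h]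
        have hdrop : (i :: tpos rest (i + 1)).drop s.toNat
            = (tpos rest (i + 1)).drop (s - 1).toNat := by
          have : s.toNat = (s - 1).toNat + 1 := by omega
          rw [this]; rfl
        rw [hdrop]
        have h1 : i + ((rest.length + 1 : Nat) : Int) = (i + 1) + (rest.length : Int) := by
          push_cast; ring
        have h2 : r + ((if True then (1:Int) else 0) + cntT rest) - s
            = r + cntT rest - (s - 1) := by simp; ring
        rw [h1, h2]
        exact ih (i + 1) r (s - 1) (by omega)
      · have hs0 : s = 0 := by omega
        subst hs0
        simp only [tpos, keptSum, cntT, List.length_cons, if_neg h, Int.toNat_zero,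
          List.drop_zero, sumKept]
        rw [sumKept_acc]
        have hterm : (0 : Int) + (i + ((rest.length + 1 : Nat) : Int) - 1 - i -
            (r + ((if True then (1:Int) else 0) + cntT rest) - 0 - 1 - r)) = cntF rest := by
          rw [cntF_eq]; simp; push_cast; ring
        rw [hterm]
        have h1 : i + ((rest.length + 1 : Nat) : Int) = (i + 1) + (rest.length : Int) := by
          push_cast; ring
        have h2 : r + ((if True then (1:Int) else 0) + cntT rest) - 0
            = (r + 1) + cntT rest - 0 := by simp; ring
        rw [h1, h2]
        have := ih (i + 1) (r + 1) 0 le_rfl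
        simpa using this

theorem filter_eq_tpos (c : Int → Bool) : ∀ (n : Nat) (a : Int),
    (PySem.List.pyRange a (a + n) 1).filter c
      = tpos ((PySem.List.pyRange a (a + n) 1).map c) a := by
  intro n
  induction n with
  | zero => intro a; rw [PySem.List.pyRange_one_eq_nil (by omega)]; rfl
  | succ m ih =>
    intro a
    rw [PySem.List.pyRange_one_cons (by push_cast; omega)]
    have hrw : a + ((m + 1 : Nat) : Int) = (a + 1) + (m : Nat) := by push_cast; ring
    simp only [List.filter_cons, List.map_cons]
    by_cases hc : c a
    · rw [hc]; simp only [if_pos rfl]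
      show a :: _ = tpos (true :: _) a
      rw [hrw, ih (a + 1)]; rfl
    · rw [Bool.not_eq_true] at hc; rw [hc]
      simp only [Bool.false_eq_true, if_false]
      show _ = tpos (false :: _) a
      rw [hrw, ih (a + 1)]; rfl

theorem length_filter_eq_cntT (c : Int → Bool) (l : List Int) :
    ((l.filter c).length : Int) = cntT (l.map c) := by
  induction l with
  | nil => simp [cntT]
  | cons x rest ih =>
    by_cases hc : c x
    · simp [List.filter_cons, hc, cntT, ← ih]; push_cast; ring
    · rw [Bool.not_eq_true] at hc
      simp [List.filter_cons, hc, cntT, ← ih]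

theorem foldl_eq_cntT (L : List Bool) : ∀ (a : Int),
    L.foldl (fun a b => a + (if b then (1 : Int) else 0)) a = a + cntT L := by
  induction L with
  | nil => intro a; simp [cntT]
  | cons b rest ih => intro a; simp only [List.foldl_cons, cntT, ih]; ring

-- ===== VERDICT (by name: the statement is the Claim_ definition above) =====
theorem solve_spec : Claim_equal_solve := by
  intro Parms X V _ hPre
  obtain ⟨hlen, -, -⟩ := hPre
  rcases Parms with _ | ⟨N, _ | ⟨K, _ | ⟨B, _ | ⟨T, _ | ⟨e, rest⟩⟩⟩⟩⟩ <;>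
    simp only [List.length] at hlen <;> try omega
  unfold Spec_solve solve solve_alt
  simp only [List.length_cons, List.length_nil, List.getD_cons_zero, List.getD_cons_succ,
    Nat.reduceAdd, reduceIte]
  set c : Int → Bool :=
    fun i => decide (B ≤ PySem.List.pyGetD X i 0 + PySem.List.pyGetD V i 0 * T) with hc
  rcases le_or_gt N 0 with hN | hN
  · -- N ≤ 0: empty range on both sides
    rw [PySem.List.pyRange_one_eq_nil (by omega)]
    simp only [List.map_nil, List.filter_nil, List.foldl_nil, List.length_nil,
      Nat.cast_zero, List.drop_nil]
    split
    · rfl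
    · simp [findStartA, accumA, sumKept]
  · -- 0 < N
    have hNn : N = ((N.toNat : Nat) : Int) := by omega
    have hfilter : (PySem.List.pyRange 0 N 1).filter c
        = tpos ((PySem.List.pyRange 0 N 1).map c) 0 := by
      rw [hNn]
      have := filter_eq_tpos c N.toNat 0
      simpa using this
    have hsm : (((PySem.List.pyRange 0 N 1).filter c).length : Int)
        = cntT ((PySem.List.pyRange 0 N 1).map c) :=
      length_filter_eq_cntT c _
    set UH := (PySem.List.pyRange 0 N 1).map c with hUH
    have hfold : UH.foldl (fun a b => a + (if b then (1 : Int) else 0)) 0 = cntT UH := by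
      rw [foldl_eq_cntT]; ring
    rw [hfold, hsm, hfilter]
    split
    · rfl
    · next hK =>
      rw [main_lemma UH (cntT UH - K) (by omega),
        onePassB_eq_keptSum UH (cntT UH - K) 0 0]
      have hlenUH : (UH.length : Int) = N := by
        rw [hUH]; simp [PySem.List.length_pyRange_one]; omega
      have := sumKept_tpos UH 0 0 (cntT UH - K) (by omega)
      rw [show (0 : Int) + (UH.length : Int) = N by omega] at this
      rw [show (0 : Int) + cntT UH - (cntT UH - K) = K by ring] at this
      rw [this]
      ring_nf
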